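-- pv_equiv track=rewrite | github.com/Flowtter/crispy | legacy-backend/src/utils/IO/io.py | generate_clean_name
-- ===== SOURCE A (Python) =====
-- def generate_clean_name(name: str) -> str:
--     """
--     Generate the path from the name
--     Remove the delim characters from the file name
--     Add hash so (hello world) and (hello_world) are different
--     """
--
--     def custom_hash(string: str) -> str:
--         """
--         Generate a hash from the name, same for each session
--         """
--         h = 0
--         for ch in string:
--             h = (h * 281 ^ ord(ch) * 997) & 0xFFFFFFFF
--         return str(h)
--
--     init_name = name
--     name = name.replace(" ", "__")
--     name = name.replace("-", "__")
--     name = name.replace("/", "__")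
--     name = name.replace("\\", "__")
--
--     return name + "-" + custom_hash(init_name)
-- ===== SOURCE B (Python) =====
-- def generate_clean_name(name: str) -> str:
--     """Single pass: clean the name and compute the hash in one loop."""
--     out = []
--     h = 0
--     for ch in name:
--         out.append("__" if ch in " -/\\" else ch)
--         h = (h * 281 ^ ord(ch) * 997) & 0xFFFFFFFF
--     return "".join(out) + "-" + str(h)
-- ===== Notes on version B (the rewrite author's own statement) =====
-- stated objective: alternative
-- what changed: Fuses A's four sequential str.replace passes and the separate hash loop into a single traversal that builds the cleaned output and the 32-bit hash together.
import Mathlib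
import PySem

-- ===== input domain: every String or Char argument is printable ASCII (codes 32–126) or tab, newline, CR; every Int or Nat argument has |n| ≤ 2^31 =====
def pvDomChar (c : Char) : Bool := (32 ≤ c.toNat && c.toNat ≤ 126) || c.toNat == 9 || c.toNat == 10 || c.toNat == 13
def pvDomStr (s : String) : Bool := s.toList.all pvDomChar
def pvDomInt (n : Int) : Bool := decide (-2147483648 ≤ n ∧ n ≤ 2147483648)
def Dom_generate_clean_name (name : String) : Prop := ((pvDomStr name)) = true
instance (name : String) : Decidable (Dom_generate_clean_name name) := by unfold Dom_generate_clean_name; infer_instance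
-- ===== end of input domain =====

-- B fuses A's four replace passes and the hash loop into one traversal (objective: alternative single-pass decomposition).

-- ===== PORT A =====
-- A's inner custom_hash, kept as a helper (str(...) applied at the use site)
def pvCustomHash (s : List Char) : Int :=
  s.foldl (fun h ch =>
    PySem.Int.band (PySem.Int.bxor (h * 281) ((ch.toNat : Int) * 997)) 0xFFFFFFFF) 0

def generate_clean_name (name : String) : String :=
  let init_name := name
  let n1 := PySem.Str.replace name " " "__"
  let n2 := PySem.Str.replace n1 "-" "__"
  let n3 := PySem.Str.replace n2 "/" "__"
  let n4 := PySem.Str.replace n3 "\\" "__"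
  -- Python's `n4 + "-" + str(h)`, built with String.ofList (exact; Lean's String.append is kernel-opaque)
  String.ofList (n4.toList ++ ('-' :: (PySem.Int.toStr (pvCustomHash init_name.toList)).toList))

-- ===== PORT B =====
def generate_clean_name_alt (name : String) : String :=
  let st := name.toList.foldl
    (fun (st : List Char × Int) ch =>
      (st.1 ++ (if ch = ' ' ∨ ch = '-' ∨ ch = '/' ∨ ch = '\\' then ['_', '_'] else [ch]),
       PySem.Int.band (PySem.Int.bxor (st.2 * 281) ((ch.toNat : Int) * 997)) 0xFFFFFFFF))
    ([], 0)
  String.ofList (st.1 ++ ('-' :: (PySem.Int.toStr st.2).toList))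

-- ===== PRECONDITION & SPEC =====
def Spec_generate_clean_name (name : String) (out : String) : Prop := out = generate_clean_name_alt name
instance (name : String) (out : String) : Decidable (Spec_generate_clean_name name out) := by unfold Spec_generate_clean_name; infer_instance

-- ===== CLAIM (what is proved, stated in full; the proofs are below) =====
def Claim_equal_generate_clean_name : Prop := ∀ (name : String), Dom_generate_clean_name name → Spec_generate_clean_name name (generate_clean_name name)

-- ===== LEMMAS AND PROOFS =====

-- replace with a single-character pattern is a per-character flatMap
theorem replace_go_single (c : Char) (new : List Char) :
    ∀ (fuel : Nat) (l acc : List Char), l.length ≤ fuel →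
      PySem.Chars.replace.go [c] new fuel l acc =
        acc.reverse ++ l.flatMap (fun ch => if ch = c then new else [ch]) := by
  intro fuel
  induction fuel with
  | zero =>
    intro l acc h
    have : l = [] := List.eq_nil_of_length_eq_zero (Nat.le_zero.mp h)
    subst this
    simp [PySem.Chars.replace.go]
  | succ n ih =>
    intro l acc h
    cases l with
    | nil => simp [PySem.Chars.replace.go]
    | cons ch t =>
      simp only [PySem.Chars.replace.go]
      by_cases hc : ch = c
      · subst hc
        have hp : List.isPrefixOf [ch] (ch :: t) = true := by simp [List.isPrefixOf]
        rw [if_pos hp]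
        have hd : List.drop [ch].length (ch :: t) = t := rfl
        rw [hd]
        simp only [List.length_cons] at h
        rw [ih _ _ (by omega)]
        simp
      · have hp : List.isPrefixOf [c] (ch :: t) = false := by
          simp [List.isPrefixOf]; exact fun hh => absurd hh.symm hc
        rw [if_neg (by simp [hp])]
        simp only [List.length_cons] at h
        rw [ih _ _ (by omega)]
        simp [hc]

theorem replace_single (s : List Char) (c : Char) (new : List Char) :
    PySem.Chars.replace s [c] new = s.flatMap (fun ch => if ch = c then new else [ch]) := by
  unfold PySem.Chars.replace
  simp only [List.isEmpty_cons, Bool.false_eq_true, if_false]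
  simpa using replace_go_single c new s.length s [] (le_refl _)

-- the four chained single-character replacements, pointwise
theorem chain_step (ch : Char) :
    ((if ch = ' ' then ['_', '_'] else [ch]).flatMap (fun b =>
      (if b = '-' then ['_', '_'] else [b]).flatMap (fun c =>
        (if c = '/' then ['_', '_'] else [c]).flatMap (fun d =>
          if d = '\\' then ['_', '_'] else [d])))) =
      (if ch = ' ' ∨ ch = '-' ∨ ch = '/' ∨ ch = '\\' then ['_', '_'] else [ch]) := by
  by_cases h1 : ch = ' '
  · subst h1; decide
  by_cases h2 : ch = '-'
  · subst h2; decide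
  by_cases h3 : ch = '/'
  · subst h3; decide
  by_cases h4 : ch = '\\'
  · subst h4; decide
  simp [h1, h2, h3, h4]

-- ===== VERDICT (by name: the statement is the Claim_ definition above) =====
set_option maxHeartbeats 1000000 in
theorem generate_clean_name_spec : Claim_equal_generate_clean_name := by
  intro name _
  unfold Spec_generate_clean_name generate_clean_name generate_clean_name_alt
  dsimp only
  rw [PySem.List.foldl_prod_mk
    (fun (a : List Char) ch => a ++ (if ch = ' ' ∨ ch = '-' ∨ ch = '/' ∨ ch = '\\' then ['_', '_'] else [ch]))
    (fun (h : Int) ch => PySem.Int.band (PySem.Int.bxor (h * 281) ((ch.toNat : Int) * 997)) 0xFFFFFFFF)]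
  refine congrArg String.ofList ?_
  have hb : ∀ (s : String) (pat : String) (c : Char), pat.toList = [c] →
      (PySem.Str.replace s pat "__").toList =
        s.toList.flatMap (fun ch => if ch = c then ['_', '_'] else [ch]) := by
    intro s pat c hp
    rw [PySem.Str.toList_replace, hp, replace_single]
    rfl
  rw [hb _ "\\" '\\' rfl, hb _ "/" '/' rfl, hb _ "-" '-' rfl, hb _ " " ' ' rfl]
  simp only [List.flatMap_assoc]
  refine congrArg₂ (· ++ ·) ?_ ?_
  · rw [PySem.List.foldl_append_eq_flatMap, List.nil_append]
    exact List.flatMap_congr (fun ch _ => chain_step ch)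
  · exact congrArg (fun h => '-' :: (PySem.Int.toStr h).toList) rfl
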